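-- pv_equiv track=rewrite | github.com/2018-SEMII-DESIV-G1/prueba_diagnostica | 001.py | get_fib_series
-- ===== SOURCE A (Python) =====
-- def get_fib_series(n=10):
--     # Secuencia regular fibonacci
--     fib = [0, 1]
--
--     # Secuencia de fibonacci sólo con impares
--     resfib = [0, 1]
--
--     # El i empieza en 2 porque estoy ignorando los 2
--     # primeros elementos del array "fib", ya que
--     # siempre son 0 y 1.
--     i = 2
--
--     # Mientras la cantidad de elementos en resfib
--     # sea menor que la cantidad de elementos que buscamos
--     while(len(resfib) < n):
--         # Calculamos fib
--         _n = (fib[i - 2] + fib[i - 1])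
--         if(_n % 2 != 0):
--             # Solo añadimos a este array si el elemento es impar
--             resfib.append(_n)
--         # Seguimos añadiendo siempre a la secuencia
--         fib.append(_n)
--         # Incrementamos el contador de elementos de toda la
--         # serie fibonacci.
--         i += 1
--     return resfib, fib
-- ===== SOURCE B (Python) =====
-- def get_fib_series(n=10):
--     # The Fibonacci sequence is odd exactly at indices not divisible by 3, so the
--     # k = n - 2 odd values after the seeds are produced by exactly t = k + k // 2
--     # generated terms.  Compute t in closed form, generate unconditionally, and
--     # select the odd subsequence by index arithmetic -- no parity tests, no
--     # length-driven termination condition.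
--     k = n - 2
--     t = k + k // 2
--     fib = [0, 1]
--     a, b = 0, 1
--     for _ in range(t):
--         a, b = b, a + b
--         fib.append(b)
--     resfib = [0, 1] + [x for i, x in enumerate(fib) if i >= 2 and i % 3 != 0]
--     return resfib, fib
-- ===== Notes on version B (the rewrite author's own statement) =====
-- stated objective: alternative
-- what changed: A loops until resfib reaches the requested length, testing each new term's parity; B instead uses the fact that a Fibonacci number is odd exactly when its index is not a multiple of three, computes the required number of generated terms in closed form (k odd values need k plus k halved terms), generates that many terms unconditionally, and selects the odd subsequence by index arithmetic with no parity tests and no length-driven termination.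
import Mathlib
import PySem

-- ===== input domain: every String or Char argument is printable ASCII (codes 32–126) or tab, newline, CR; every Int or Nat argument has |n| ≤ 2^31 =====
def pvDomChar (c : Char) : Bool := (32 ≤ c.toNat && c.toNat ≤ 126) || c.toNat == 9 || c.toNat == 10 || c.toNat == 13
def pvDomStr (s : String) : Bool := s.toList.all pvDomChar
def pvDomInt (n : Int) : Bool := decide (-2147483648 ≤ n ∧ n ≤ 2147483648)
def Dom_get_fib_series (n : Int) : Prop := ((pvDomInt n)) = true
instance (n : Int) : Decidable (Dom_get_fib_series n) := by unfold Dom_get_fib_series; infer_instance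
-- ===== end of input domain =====

-- B replaces A's length-driven loop with a closed-form term count and index-pattern
-- selection of the odd values (alternative decomposition; same cost).

-- ===== PORT A =====
-- A's while loop; a and b mirror fib[i-2] and fib[i-1] exactly (in A, i = len(fib)
-- throughout, so fib[i-2], fib[i-1] are always the last two appended values).
-- fuel is only a totality guard: at least 2 of every 3 generated values are odd, so
-- the loop runs at most 3·n steps before the guard fails, and when fuel runs out the
-- returned state is the same one the failing guard would return; get_fib_series
-- supplies fuel 3·n.toNat + 3, which the loop never exhausts before its guard fails.
def fibLoopA : Nat → Int → List Int → List Int → Int → Int → List Int × List Int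
  | 0, _, fib, resfib, _, _ => (resfib, fib)
  | fuel + 1, n, fib, resfib, a, b =>
    if (resfib.length : Int) < n then
      let c := a + b
      if c % 2 ≠ 0 then fibLoopA fuel n (fib ++ [c]) (resfib ++ [c]) b c
      else fibLoopA fuel n (fib ++ [c]) resfib b c
    else (resfib, fib)

def get_fib_series (n : Int) : List Int × List Int :=
  fibLoopA (3 * n.toNat + 3) n [0, 1] [0, 1] 0 1

-- ===== PORT B =====
-- B's for-loop over range(t): appends t = (n-2) + (n-2)//2 terms (range is empty
-- when t ≤ 0, which .toNat reflects exactly).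
def fibGen : Nat → Int → Int → List Int → List Int
  | 0, _, _, fib => fib
  | m + 1, a, b, fib => fibGen m b (a + b) (fib ++ [a + b])

-- Python's enumerate(xs) with a running index, kept as Int like Python's; exact.
def enumFrom (i : Int) : List Int → List (Int × Int)
  | [] => []
  | x :: xs => (i, x) :: enumFrom (i + 1) xs

def get_fib_series_alt (n : Int) : List Int × List Int :=
  let k := n - 2
  let t := k + PySem.Int.floordiv k 2
  let fib := fibGen t.toNat 0 1 [0, 1]
  let resfib := [0, 1] ++
    ((enumFrom 0 fib).filter (fun p => decide (2 ≤ p.1 ∧ p.1 % 3 ≠ 0))).map Prod.snd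
  (resfib, fib)

-- ===== PRECONDITION & SPEC =====
def Spec_get_fib_series (n : Int) (out : List Int × List Int) : Prop := out = get_fib_series_alt n
instance (n : Int) (out : List Int × List Int) : Decidable (Spec_get_fib_series n out) := by unfold Spec_get_fib_series; infer_instance

-- ===== CLAIM (what is proved, stated in full; the proofs are below) =====
def Claim_equal_get_fib_series : Prop := ∀ (n : Int), Dom_get_fib_series n → Spec_get_fib_series n (get_fib_series n)

-- ===== LEMMAS AND PROOFS =====

-- The m values generated from seeds a, b (pure form of both loops' generation).
def genFrom : Int → Int → Nat → List Int
  | _, _, 0 => []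
  | a, b, m + 1 => (a + b) :: genFrom b (a + b) m

-- Number of indices i ∈ [j, j+m) with i % 3 ≠ 0 (closed form: m minus the
-- multiples of 3 in that interval).
def cnt (j m : Nat) : Nat := m - ((j + m + 2) / 3 - (j + 2) / 3)

lemma fibGen_eq (m : Nat) : ∀ (a b : Int) (acc : List Int),
    fibGen m a b acc = acc ++ genFrom a b m := by
  induction m with
  | zero => intro a b acc; simp [fibGen, genFrom]
  | succ m ih => intro a b acc; simp [fibGen, genFrom, ih, List.append_assoc]

-- Loop alignment: with the parity invariant (fib's entry at index i is odd iff
-- 3 ∤ i) and the bookkeeping that exactly cnt (j+2) m odds remain to be produced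
-- (the last produced term being odd), A's interleaved loop returns exactly the
-- generated block and its odd sublist.
lemma loopA_eq (m : Nat) : ∀ (fuel : Nat) (n : Int) (j : Nat) (fib resfib : List Int) (a b : Int),
    m ≤ fuel →
    a % 2 = (if j % 3 = 0 then 0 else 1) →
    b % 2 = (if (j + 1) % 3 = 0 then 0 else 1) →
    ((m = 0 ∧ n ≤ (resfib.length : Int)) ∨
      (0 < m ∧ (resfib.length : Int) + (cnt (j + 2) m : Int) = n ∧ (j + m + 1) % 3 ≠ 0)) →
    fibLoopA fuel n fib resfib a b =
      (resfib ++ (genFrom a b m).filter (fun x => decide (x % 2 ≠ 0)), fib ++ genFrom a b m) := by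
  induction m with
  | zero =>
    intro fuel n j fib resfib a b _ _ _ hinv
    have hle : n ≤ (resfib.length : Int) := by
      rcases hinv with ⟨_, h⟩ | ⟨h, _⟩
      · exact h
      · omega
    cases fuel with
    | zero => simp [fibLoopA, genFrom]
    | succ fuel => simp [fibLoopA, genFrom, not_lt.mpr hle]
  | succ m ih =>
    intro fuel n j fib resfib a b hfuel ha hb hinv
    rcases hinv with ⟨h0, _⟩ | ⟨_, hlen, hlast⟩
    · exact absurd h0 (Nat.succ_ne_zero m)
    cases fuel with
    | zero => omega
    | succ fuel =>
      have hlast' : (j + m + 2) % 3 ≠ 0 := by omega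
      have hguard : (resfib.length : Int) < n := by
        have h1 : 1 ≤ cnt (j + 2) (m + 1) := by unfold cnt; omega
        omega
      rw [fibLoopA, if_pos hguard]
      have hc : (a + b) % 2 = (if (j + 2) % 3 = 0 then 0 else 1) := by
        split_ifs at ha hb ⊢ <;> omega
      have hc' : (a + b) % 2 = (if (j + 1 + 1) % 3 = 0 then 0 else 1) := by
        rw [show j + 1 + 1 = j + 2 from rfl]; exact hc
      have hfuel' : m ≤ fuel := by omega
      by_cases hodd : (j + 2) % 3 = 0
      · -- the new term is even: resfib unchanged
        have hc0 : (a + b) % 2 = 0 := by rw [hc, if_pos hodd]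
        have hm : 0 < m := by omega
        have hcnt : cnt (j + 2) (m + 1) = cnt (j + 1 + 2) m := by unfold cnt; omega
        rw [if_neg (by omega)]
        have := ih fuel n (j + 1) (fib ++ [a + b]) resfib b (a + b) hfuel' hb hc'
          (Or.inr ⟨hm, by rw [← hcnt]; exact hlen, by omega⟩)
        rw [this]
        simp [genFrom, hc0, List.append_assoc]
      · -- the new term is odd: it is appended to resfib too
        have hc1 : (a + b) % 2 = 1 := by rw [hc, if_neg hodd]
        rw [if_pos (by omega)]
        have hinv' : (m = 0 ∧ n ≤ ((resfib ++ [a + b]).length : Int)) ∨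
            (0 < m ∧ ((resfib ++ [a + b]).length : Int) + (cnt (j + 1 + 2) m : Int) = n ∧
              (j + 1 + m + 1) % 3 ≠ 0) := by
          have hlen' : ((resfib ++ [a + b]).length : Int) = (resfib.length : Int) + 1 := by
            simp
          rcases Nat.eq_zero_or_pos m with h0 | h0
          · subst h0; left
            have hcnt : cnt (j + 2) 1 = 1 := by unfold cnt; omega
            rw [hcnt] at hlen
            exact ⟨rfl, by omega⟩
          · right
            have hcnt : cnt (j + 2) (m + 1) = 1 + cnt (j + 1 + 2) m := by unfold cnt; omega
            rw [hcnt] at hlen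
            push_cast at hlen
            exact ⟨h0, by omega, by omega⟩
        have := ih fuel n (j + 1) (fib ++ [a + b]) (resfib ++ [a + b]) b (a + b) hfuel' hb hc' hinv'
        rw [this]
        simp [genFrom, hc1, List.append_assoc]

-- Selection alignment: under the same parity invariant, picking the generated
-- terms whose index is not divisible by 3 is exactly filtering them by oddness.
lemma sel_eq (m : Nat) : ∀ (j : Nat) (a b : Int),
    a % 2 = (if j % 3 = 0 then 0 else 1) →
    b % 2 = (if (j + 1) % 3 = 0 then 0 else 1) →
    ((enumFrom ((j : Int) + 2) (genFrom a b m)).filter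
        (fun p => decide (2 ≤ p.1 ∧ p.1 % 3 ≠ 0))).map Prod.snd
      = (genFrom a b m).filter (fun x => decide (x % 2 ≠ 0)) := by
  induction m with
  | zero => intro j a b _ _; simp [genFrom, enumFrom]
  | succ m ih =>
    intro j a b ha hb
    have hc : (a + b) % 2 = (if (j + 2) % 3 = 0 then 0 else 1) := by
      split_ifs at ha hb ⊢ <;> omega
    have hc' : (a + b) % 2 = (if (j + 1 + 1) % 3 = 0 then 0 else 1) := by
      rw [show j + 1 + 1 = j + 2 from rfl]; exact hc
    have hcast : (j : Int) + 2 + 1 = ((j + 1 : Nat) : Int) + 2 := by push_cast; ring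
    have ihs := ih (j + 1) b (a + b) hb hc'
    simp only [genFrom, enumFrom, List.filter_cons, hcast]
    by_cases hodd : (j + 2) % 3 = 0
    · have hd1 : decide (2 ≤ (j : Int) + 2 ∧ ((j : Int) + 2) % 3 ≠ 0) = false := by
        simp only [decide_eq_false_iff_not]; rintro ⟨-, h⟩; omega
      have hd2 : decide ((a + b) % 2 ≠ 0) = false := by
        simp only [decide_eq_false_iff_not]; rw [hc, if_pos hodd]; omega
      rw [hd1, hd2]
      simpa using ihs
    · have hd1 : decide (2 ≤ (j : Int) + 2 ∧ ((j : Int) + 2) % 3 ≠ 0) = true := by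
        simp only [decide_eq_true_eq]; exact ⟨by omega, by omega⟩
      have hd2 : decide ((a + b) % 2 ≠ 0) = true := by
        simp only [decide_eq_true_eq]; rw [hc, if_neg hodd]; omega
      rw [hd1, hd2]
      simp only [if_true, List.map_cons]
      rw [ihs]

-- ===== VERDICT (by name: the statement is the Claim_ definition above) =====
theorem get_fib_series_spec : Claim_equal_get_fib_series := by
  intro n _
  unfold Spec_get_fib_series get_fib_series get_fib_series_alt
  dsimp only
  have hfd : PySem.Int.floordiv (n - 2) 2 = (n - 2) / 2 :=
    PySem.Int.floordiv_eq_ediv_of_pos (by norm_num)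
  rw [hfd]
  have ha0 : (0 : Int) % 2 = (if (0 : Nat) % 3 = 0 then 0 else 1) := by norm_num
  have hb0 : (1 : Int) % 2 = (if ((0 : Nat) + 1) % 3 = 0 then 0 else 1) := by norm_num
  set m : Nat := (n - 2 + (n - 2) / 2).toNat with hm
  by_cases hn : n ≤ 2
  · -- no terms are generated on either side
    have hm0 : m = 0 := by rw [hm]; omega
    have hA := loopA_eq 0 (3 * n.toNat + 3) n 0 [0, 1] [0, 1] 0 1 (by omega) ha0 hb0
      (Or.inl ⟨rfl, by simpa using hn⟩)
    rw [hA, hm0]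
    simp [fibGen, genFrom, enumFrom]
  · -- n ≥ 3: m terms, exactly n - 2 of them odd, the last one odd
    have hmt : (m : Int) = n - 2 + (n - 2) / 2 := by rw [hm]; omega
    have hcnt : cnt (0 + 2) m = (n - 2).toNat := by unfold cnt; omega
    have hlen : ((([0, 1] : List Int).length : Int)) + (cnt (0 + 2) m : Int) = n := by
      rw [hcnt]; simp; omega
    have hlast : (0 + m + 1) % 3 ≠ 0 := by omega
    have hA := loopA_eq m (3 * n.toNat + 3) n 0 [0, 1] [0, 1] 0 1 (by omega) ha0 hb0
      (Or.inr ⟨by omega, hlen, hlast⟩)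
    rw [hA, fibGen_eq]
    have hsel := sel_eq m 0 0 1 ha0 hb0
    rw [show ((0 : Nat) : Int) + 2 = 2 from by norm_num] at hsel
    simp only [List.cons_append, List.nil_append, enumFrom, List.filter_cons]
    rw [show (0 : Int) + 1 + 1 = 2 from by norm_num]
    have he0 : decide (2 ≤ (0 : Int) ∧ (0 : Int) % 3 ≠ 0) = false := by decide
    have he1 : decide (2 ≤ (0 : Int) + 1 ∧ ((0 : Int) + 1) % 3 ≠ 0) = false := by decide
    rw [he0, he1]
    simp only [Bool.false_eq_true, if_false, hsel]
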